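-- pv_equiv track=rewrite | github.com/bensmus/text_compress | decoder.py | encoded_bytes_to_bitstring
-- ===== SOURCE A (Python) =====
-- def encoded_bytes_to_bitstring(encoded, bitlength):
--     bitstring = ''
--     bitlength_last = bitlength - (bitlength // 8) * 8
--     for i, b in enumerate(encoded):
--         s = bin(b)[2:]
--         # encoder split a binary string into groups of 8, so bin(b) does not capture leading 0's
--         if i < len(encoded) - 1:
--             s = '0' * (8 - len(s)) + s
--         else:
--             s = '0' * (bitlength_last - len(s)) + s
--         bitstring += s
--     assert len(bitstring) == bitlength
--     return bitstring
-- ===== SOURCE B (Python) =====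
-- def encoded_bytes_to_bitstring(encoded, bitlength):
--     if not encoded:
--         bitstring = ''
--     else:
--         if len(encoded) > 1:
--             head = format(int.from_bytes(bytes(encoded[:-1]), 'big'),
--                           '0{}b'.format(8 * (len(encoded) - 1)))
--         else:
--             head = ''
--         bitstring = head + format(encoded[-1], 'b').zfill(bitlength % 8)
--     assert len(bitstring) == bitlength
--     return bitstring
-- ===== Notes on version B (the rewrite author's own statement) =====
-- stated objective: idiomatic
-- what changed: Replaces the per-byte loop (bin, manual zero-padding, string accumulation) by one bulk int.from_bytes conversion of all full bytes formatted at fixed width in one step, plus the last byte zfill'ed to bitlength % 8; Pre_ restricts elements to the encoder's byte range 0..255 and to bitlengths where A's final assert passes.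
-- outside the precondition, e.g. on encoded_bytes_to_bitstring([300, 300], 18): A returns '100101100100101100', B raises ValueError; on encoded_bytes_to_bitstring([-5], 4): A returns 'b101', B returns '-101'
import Mathlib
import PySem

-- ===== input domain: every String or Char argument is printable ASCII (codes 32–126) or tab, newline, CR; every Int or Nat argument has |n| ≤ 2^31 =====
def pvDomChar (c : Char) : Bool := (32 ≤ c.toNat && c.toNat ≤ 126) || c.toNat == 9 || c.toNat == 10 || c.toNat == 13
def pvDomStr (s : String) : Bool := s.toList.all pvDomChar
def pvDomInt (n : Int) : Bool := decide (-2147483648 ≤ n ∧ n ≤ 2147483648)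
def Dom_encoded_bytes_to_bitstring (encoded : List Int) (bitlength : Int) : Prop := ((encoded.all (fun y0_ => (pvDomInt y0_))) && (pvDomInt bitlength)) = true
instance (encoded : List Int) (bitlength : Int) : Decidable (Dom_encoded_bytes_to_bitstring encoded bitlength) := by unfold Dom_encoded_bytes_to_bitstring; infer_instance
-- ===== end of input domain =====

-- B converts all full bytes at once (int.from_bytes + fixed-width format) instead of A's per-byte
-- bin/pad/concatenate loop; equal on Pre_ (byte-range elements, bitlengths where A's assert passes).

-- ===== PORT A =====
-- binary digits of n (MSB first, no sign), hand port of CPython's binary formatter, exact for n ≥ 0;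
-- fuel-structured (fuel = the number itself always suffices since n is halved each step);
-- shared by both ports, as both Pythons use the interpreter's formatter (bin / format(_, 'b'))
def natBinAux : Nat → Nat → List Char → List Char
  | 0, _, acc => acc
  | fuel+1, n, acc =>
    if n = 0 then acc
    else natBinAux fuel (n / 2) ((if n % 2 = 1 then '1' else '0') :: acc)

def natBin (n : Nat) : List Char := if n = 0 then ['0'] else natBinAux n n []

-- bin(b)[2:] : for b ≥ 0 the binary digits; for b < 0, '-0b…'[2:] = 'b' followed by digits (exact)
def pyBinTail (b : Int) : List Char :=
  if b < 0 then 'b' :: natBin (-b).toNat else natBin b.toNat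

def encoded_bytes_to_bitstring (encoded : List Int) (bitlength : Int) : String :=
  let bitlength_last := bitlength - (PySem.Int.floordiv bitlength 8) * 8
  String.ofList ((PySem.List.enumerate encoded).foldl (fun acc ib =>
      let s := pyBinTail ib.2
      let s := if ib.1 < (encoded.length : Int) - 1
               then List.replicate (8 - s.length) '0' ++ s            -- '0'*(8-len(s)) + s
               else List.replicate (bitlength_last - (s.length : Int)).toNat '0' ++ s
      acc ++ s) [])
  -- the final 'assert len(bitstring) == bitlength' raises exactly on the inputs Pre_ excludes

-- ===== PORT B =====
-- int.from_bytes(bytes(xs), 'big')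
def intFromBytes (xs : List Int) : Int := xs.foldl (fun acc b => acc * 256 + b) 0

-- format(x, 'b'): binary digits, '-' first for negatives (exact)
def fmtBin (x : Int) : List Char := if x < 0 then '-' :: natBin (-x).toNat else natBin x.toNat

-- zero-pad on the left to width w; = str.zfill / format(_, '0{w}b') for sign-free strings (exact there)
def zfill (w : Nat) (s : List Char) : List Char := List.replicate (w - s.length) '0' ++ s

-- s.zfill(w), sign-aware like Python's (exact)
def pyZfill (w : Nat) (s : List Char) : List Char :=
  if s.head? = some '-' ∨ s.head? = some '+' then
    (if w ≤ s.length then s else s.head?.getD '-' :: (List.replicate (w - s.length) '0' ++ s.tail))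
  else zfill w s

def encoded_bytes_to_bitstring_alt (encoded : List Int) (bitlength : Int) : String :=
  if encoded.isEmpty then "" else
    let head := if 1 < encoded.length
      then zfill (8 * (encoded.length - 1)) (natBin (intFromBytes encoded.dropLast).toNat)
      else []
    String.ofList (head ++ pyZfill (PySem.Int.mod bitlength 8).toNat (fmtBin (encoded.getLastD 0)))

-- ===== PRECONDITION & SPEC =====
-- Pre_ = exactly the inputs where A returns normally (its final assert passes), intersected with the
-- encoder's byte range 0..255: outside that range A can still return strings containing 'b' or
-- unpadded overlong groups, while B's bytes()/format naturally raises ValueError or emits a '-' sign.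
def Pre_encoded_bytes_to_bitstring (encoded : List Int) (bitlength : Int) : Prop :=
  (∀ b ∈ encoded, 0 ≤ b ∧ b < 256) ∧
  (if encoded.isEmpty then bitlength = 0
   else if PySem.Int.mod bitlength 8 = 0
     then bitlength = 8 * (encoded.length : Int) ∧ 128 ≤ encoded.getLastD 0
     else bitlength = 8 * ((encoded.length : Int) - 1) + PySem.Int.mod bitlength 8
          ∧ encoded.getLastD 0 < 2 ^ (PySem.Int.mod bitlength 8).toNat)

instance (encoded : List Int) (bitlength : Int) : Decidable (Pre_encoded_bytes_to_bitstring encoded bitlength) := by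
  unfold Pre_encoded_bytes_to_bitstring; infer_instance

def pvWitness_encoded_bytes_to_bitstring : List Int × Int := ([171, 5], 11)

def Spec_encoded_bytes_to_bitstring (encoded : List Int) (bitlength : Int) (out : String) : Prop := out = encoded_bytes_to_bitstring_alt encoded bitlength
instance (encoded : List Int) (bitlength : Int) (out : String) : Decidable (Spec_encoded_bytes_to_bitstring encoded bitlength out) := by unfold Spec_encoded_bytes_to_bitstring; infer_instance

-- ===== CLAIM (what is proved, stated in full; the proofs are below) =====
def Claim_equal_encoded_bytes_to_bitstring : Prop := ∀ (encoded : List Int) (bitlength : Int), Dom_encoded_bytes_to_bitstring encoded bitlength → Pre_encoded_bytes_to_bitstring encoded bitlength → Spec_encoded_bytes_to_bitstring encoded bitlength (encoded_bytes_to_bitstring encoded bitlength)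

-- ===== LEMMAS AND PROOFS =====

-- proof-side ideal of natBinAux: binary digits of n, MSB first, [] for 0
def bitsTrim : Nat → List Char
  | 0 => []
  | n+1 => bitsTrim ((n+1) / 2) ++ [if (n+1) % 2 = 1 then '1' else '0']
decreasing_by omega

theorem natBinAux_eq (fuel : Nat) : ∀ n acc, n ≤ fuel →
    natBinAux fuel n acc = bitsTrim n ++ acc := by
  induction fuel with
  | zero =>
    intro n acc h
    obtain rfl : n = 0 := by omega
    simp [natBinAux, bitsTrim]
  | succ fuel ih =>
    intro n acc h
    match n with
    | 0 => simp [natBinAux, bitsTrim]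
    | m+1 =>
      rw [natBinAux, if_neg (by omega), ih ((m+1)/2) _ (by omega), bitsTrim]
      simp

theorem natBin_pos (n : Nat) (h : 0 < n) : natBin n = bitsTrim n := by
  rw [natBin, if_neg (by omega), natBinAux_eq n n [] le_rfl, List.append_nil]

-- the w-bit fixed-width binary representation (low w bits of m), MSB first
def bitsFix : Nat → Nat → List Char
  | 0, _ => []
  | k+1, m => bitsFix k (m / 2) ++ [if m % 2 = 1 then '1' else '0']

theorem bitsFix_length (w : Nat) : ∀ m, (bitsFix w m).length = w := by
  induction w with
  | zero => intro m; rfl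
  | succ k ih => intro m; rw [bitsFix]; simp [ih]

theorem bitsFix_zero (w : Nat) : bitsFix w 0 = List.replicate w '0' := by
  induction w with
  | zero => rfl
  | succ k ih => rw [bitsFix]; simp [ih, List.replicate_succ']

theorem zfill_natBin_eq_bitsFix (w : Nat) : ∀ m, 0 < w → m < 2 ^ w →
    zfill w (natBin m) = bitsFix w m := by
  induction w with
  | zero => intro m h; omega
  | succ k ih =>
    intro m _ hm
    match m, hm with
    | 0, _ => simp [natBin, zfill, bitsFix_zero, List.replicate_succ']
    | (m+1), hm =>
      rw [natBin_pos _ (by omega), bitsTrim, bitsFix]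
      rcases Nat.eq_zero_or_pos ((m+1) / 2) with hd | hd
      · rw [hd, bitsFix_zero]
        simp [zfill, bitsTrim]
      · have hk : 0 < k := by
          rcases Nat.eq_zero_or_pos k with rfl | hk
          · omega
          · exact hk
        have hlt : (m+1) / 2 < 2 ^ k := by
          have := Nat.pow_succ 2 k ▸ hm; omega
        have hih := ih ((m+1)/2) hk hlt
        rw [← natBin_pos _ hd, ← hih]
        have hlen : (natBin ((m+1)/2)).length ≤ k := by
          have h1 : (zfill k (natBin ((m+1)/2))).length = (bitsFix k ((m+1)/2)).length := by
            rw [hih]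
          simp only [zfill, List.length_append, List.length_replicate, bitsFix_length] at h1
          omega
        simp only [zfill, List.length_append, List.length_cons, List.length_nil]
        have : k + 1 - ((natBin ((m+1)/2)).length + (0 + 1)) = k - (natBin ((m+1)/2)).length := by
          omega
        rw [this, List.append_assoc]

theorem bitsFix_split (b : Nat) : ∀ (a n : Nat),
    bitsFix (a + b) n = bitsFix a (n / 2 ^ b) ++ bitsFix b (n % 2 ^ b) := by
  induction b with
  | zero => intro a n; simp [bitsFix]
  | succ k ih =>
    intro a n
    have h1 : n % 2 ^ (k+1) % 2 = n % 2 :=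
      Nat.mod_mod_of_dvd n ⟨2^k, (pow_succ 2 k).trans (Nat.mul_comm (2^k) 2)⟩
    have h2 : n % 2 ^ (k+1) / 2 = n / 2 % 2 ^ k := by
      rw [pow_succ, Nat.mul_comm]; exact Nat.mod_mul_right_div_self n 2 (2^k)
    have h3 : n / 2 / 2 ^ k = n / 2 ^ (k+1) := by
      rw [Nat.div_div_eq_div_mul, show 2 * 2^k = 2^(k+1) by rw [pow_succ]; exact Nat.mul_comm 2 (2^k)]
    show bitsFix (a + k) (n/2) ++ _ = _ ++ (bitsFix k (n % 2^(k+1) / 2) ++ _)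
    rw [ih a (n/2), h1, h2, h3, List.append_assoc]

theorem intFromBytes_shift (xs : List Int) : ∀ a : Int,
    xs.foldl (fun acc b => acc * 256 + b) a
      = a * 256 ^ xs.length + xs.foldl (fun acc b => acc * 256 + b) 0 := by
  induction xs with
  | nil => intro a; simp
  | cons x xs ih =>
    intro a
    simp only [List.foldl_cons, List.length_cons]
    rw [ih (a * 256 + x), ih (0 * 256 + x)]
    ring

theorem intFromBytes_cons (x : Int) (xs : List Int) :
    intFromBytes (x :: xs) = x * 256 ^ xs.length + intFromBytes xs := by
  simp only [intFromBytes, List.foldl_cons]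
  rw [intFromBytes_shift]
  ring

theorem intFromBytes_bounds (xs : List Int) (h : ∀ b ∈ xs, 0 ≤ b ∧ b < 256) :
    0 ≤ intFromBytes xs ∧ intFromBytes xs < 256 ^ xs.length := by
  induction xs with
  | nil => simp [intFromBytes]
  | cons x xs ih =>
    have hx := h x (by simp)
    have ih' := ih (fun b hb => h b (by simp [hb]))
    rw [intFromBytes_cons, List.length_cons]
    constructor
    · exact add_nonneg (mul_nonneg hx.1 (by positivity)) ih'.1
    · rw [pow_succ]
      nlinarith [ih'.1, ih'.2, hx.1, hx.2, pow_pos (by norm_num : (0:Int) < 256) xs.length]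

-- bulk lemma: fixed-width binary of the big-endian byte value = concatenation of 8-bit groups
theorem bulk_eq_flatMap (xs : List Int) (h : ∀ b ∈ xs, 0 ≤ b ∧ b < 256) (hne : xs ≠ []) :
    zfill (8 * xs.length) (natBin (intFromBytes xs).toNat)
      = xs.flatMap (fun b => zfill 8 (natBin b.toNat)) := by
  induction xs with
  | nil => exact absurd rfl hne
  | cons x xs ih =>
    have hx := h x (by simp)
    have hrec : ∀ b ∈ xs, 0 ≤ b ∧ b < 256 := fun b hb => h b (by simp [hb])
    have hb := intFromBytes_bounds xs hrec
    have hpow : (256 : Int) ^ xs.length = ((2 ^ (8 * xs.length) : Nat) : Int) := by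
      push_cast; rw [show (256:Int) = 2 ^ 8 by norm_num, ← pow_mul]
    have htoNat : (intFromBytes (x :: xs)).toNat
        = x.toNat * 2 ^ (8 * xs.length) + (intFromBytes xs).toNat := by
      have h0 : 0 ≤ intFromBytes xs := hb.1
      have hx0 : x = (x.toNat : Int) := by omega
      conv_lhs => rw [intFromBytes_cons, hpow, hx0, ← Nat.cast_mul]
      rw [Int.toNat_add (Int.natCast_nonneg _) h0, Int.toNat_natCast]
    rcases List.eq_nil_or_concat' xs with hnil | _
    · subst hnil
      simp only [List.flatMap_cons, List.flatMap_nil, List.append_nil, List.length_cons,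
        List.length_nil, List.length_nil]
      rw [intFromBytes_cons]
      norm_num [intFromBytes]
    · have hxsne : xs ≠ [] := by rintro rfl; simp_all
      have hlen : 0 < xs.length := List.length_pos_iff.mpr hxsne
      have hxs : (intFromBytes xs).toNat < 2 ^ (8 * xs.length) := by rw [hpow] at hb; omega
      have hxlt : x.toNat < 2 ^ 8 := by omega
      have hNbound : (intFromBytes (x :: xs)).toNat < 2 ^ (8 + 8 * xs.length) := by
        rw [htoNat, pow_add]
        calc x.toNat * 2 ^ (8 * xs.length) + (intFromBytes xs).toNat
            < (x.toNat + 1) * 2 ^ (8 * xs.length) := by nlinarith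
          _ ≤ 2 ^ 8 * 2 ^ (8 * xs.length) := Nat.mul_le_mul_right _ (by omega)
      have h8len : 8 * (x :: xs).length = 8 + 8 * xs.length := by
        rw [List.length_cons]; ring
      rw [h8len, zfill_natBin_eq_bitsFix _ _ (by omega) hNbound, bitsFix_split]
      have hdiv : (intFromBytes (x :: xs)).toNat / 2 ^ (8 * xs.length) = x.toNat := by
        rw [htoNat, Nat.mul_comm, Nat.mul_add_div (Nat.pow_pos (by norm_num)),
          Nat.div_eq_of_lt hxs]
        omega
      have hmod : (intFromBytes (x :: xs)).toNat % 2 ^ (8 * xs.length)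
          = (intFromBytes xs).toNat := by
        rw [htoNat, Nat.mul_add_mod', Nat.mod_eq_of_lt hxs]
      rw [hdiv, hmod, ← zfill_natBin_eq_bitsFix 8 x.toNat (by norm_num) hxlt,
        ← zfill_natBin_eq_bitsFix _ _ (by omega) hxs, ih hrec hxsne, List.flatMap_cons]

theorem bitsTrim_mem (n : Nat) : ∀ c ∈ bitsTrim n, c = '0' ∨ c = '1' := by
  induction n using Nat.strong_induction_on with
  | _ n ih =>
    match n with
    | 0 => intro c hc; simp [bitsTrim] at hc
    | m+1 =>
      intro c hc
      rw [bitsTrim] at hc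
      rcases List.mem_append.mp hc with h | h
      · exact ih ((m+1)/2) (by omega) c h
      · rcases List.mem_singleton.mp h with rfl
        split <;> simp

theorem natBin_mem (n : Nat) : ∀ c ∈ natBin n, c = '0' ∨ c = '1' := by
  rcases Nat.eq_zero_or_pos n with rfl | h
  · intro c hc; simp [natBin] at hc; simp [hc]
  · rw [natBin_pos n h]; exact bitsTrim_mem n

theorem pyZfill_fmtBin (w : Nat) (x : Int) (h : 0 ≤ x) :
    pyZfill w (fmtBin x) = zfill w (natBin x.toNat) := by
  rw [fmtBin, if_neg (by omega)]
  cases hnb : natBin x.toNat with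
  | nil => simp [pyZfill]
  | cons c cs =>
    have hc : c = '0' ∨ c = '1' :=
      natBin_mem _ c (by rw [hnb]; exact List.mem_cons_self)
    have hnc : ¬((c :: cs).head? = some '-' ∨ (c :: cs).head? = some '+') := by
      rcases hc with rfl | rfl <;> simp
    rw [pyZfill, if_neg hnc]


-- A's loop over enumerate, unrolled: all but the last element take the 8-pad branch
theorem getLastD_cons_cons (x y : Int) (ys : List Int) :
    (x :: y :: ys).getLastD 0 = (y :: ys).getLastD 0 := by
  simp [List.getLastD_eq_getLast?]

theorem loopA (n w : Int) : ∀ (l : List Int), l ≠ [] → ∀ (s : Int) (acc : List Char),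
    s + l.length = n →
    (PySem.List.enumerate l s).foldl (fun acc ib =>
        let t := pyBinTail ib.2
        let t := if ib.1 < n - 1
                 then List.replicate (8 - t.length) '0' ++ t
                 else List.replicate (w - (t.length : Int)).toNat '0' ++ t
        acc ++ t) acc
      = acc ++ l.dropLast.flatMap (fun b => List.replicate (8 - (pyBinTail b).length) '0' ++ pyBinTail b)
          ++ (List.replicate (w - ((pyBinTail (l.getLastD 0)).length : Int)).toNat '0'
              ++ pyBinTail (l.getLastD 0)) := by
  intro l
  induction l with
  | nil => intro hne; exact absurd rfl hne
  | cons x xs ih =>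
    intro _ s acc hs
    rw [PySem.List.enumerate_cons, List.foldl_cons]
    match xs with
    | [] =>
      simp only [PySem.List.enumerate_nil, List.foldl_nil]
      have hc : ¬ (s < n - 1) := by
        simp only [List.length_cons, List.length_nil] at hs
        omega
      simp only [hc, if_false]
      simp
    | y :: ys =>
      have hcond : s < n - 1 := by
        simp only [List.length_cons] at hs
        push_cast at hs
        omega
      simp only [hcond, if_true]
      rw [ih (by simp) (s+1) _ (by simp only [List.length_cons] at hs ⊢; push_cast at hs ⊢; omega)]
      rw [List.dropLast_cons₂, List.flatMap_cons, getLastD_cons_cons]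
      simp [List.append_assoc]

-- ===== VERDICT (by name: the statement is the Claim_ definition above) =====
theorem encoded_bytes_to_bitstring_spec : Claim_equal_encoded_bytes_to_bitstring := by
  intro encoded bitlength _ hpre
  unfold Spec_encoded_bytes_to_bitstring
  obtain ⟨hrange, -⟩ := hpre
  unfold encoded_bytes_to_bitstring encoded_bytes_to_bitstring_alt
  match hE : encoded with
  | [] => simp [PySem.List.enumerate_nil]
  | e :: es =>
    rw [if_neg (by simp)]
    have hne : e :: es ≠ [] := by simp
    -- bitlength - (bitlength // 8) * 8 = bitlength % 8
    have hmodeq : bitlength - PySem.Int.floordiv bitlength 8 * 8 = PySem.Int.mod bitlength 8 := by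
      have := PySem.Int.floordiv_mul_add_mod bitlength 8
      omega
    have hmodnn : 0 ≤ PySem.Int.mod bitlength 8 := by
      rw [PySem.Int.mod_eq_emod_of_pos (by norm_num : (0:Int) < 8)]
      exact Int.emod_nonneg _ (by norm_num)
    simp only [hmodeq]
    rw [loopA ((e :: es).length) (PySem.Int.mod bitlength 8) (e :: es) hne 0 [] (by simp),
      List.nil_append]
    -- last parts agree
    have hlast : 0 ≤ (e :: es).getLastD 0 ∧ (e :: es).getLastD 0 < 256 := by
      apply hrange
      rw [List.getLastD_eq_getLast?, List.getLast?_eq_some_getLast hne]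
      exact List.getLast_mem hne
    have hpblast : pyBinTail ((e :: es).getLastD 0) = natBin (((e :: es).getLastD 0).toNat) := by
      rw [pyBinTail, if_neg (by omega)]
    have htail : List.replicate ((PySem.Int.mod bitlength 8) - ((pyBinTail ((e :: es).getLastD 0)).length : Int)).toNat '0'
          ++ pyBinTail ((e :: es).getLastD 0)
        = zfill (PySem.Int.mod bitlength 8).toNat (natBin (((e :: es).getLastD 0).toNat)) := by
      rw [hpblast, zfill]
      congr 2
      omega
    rw [htail]
    -- heads agree
    have hhead : (e :: es).dropLast.flatMap
          (fun b => List.replicate (8 - (pyBinTail b).length) '0' ++ pyBinTail b)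
        = (if 1 < (e :: es).length
           then zfill (8 * ((e :: es).length - 1)) (natBin (intFromBytes (e :: es).dropLast).toNat)
           else []) := by
      match es with
      | [] => simp
      | f :: fs =>
        rw [if_pos (by simp)]
        have hdne : (e :: f :: fs).dropLast ≠ [] := by simp
        have hdrange : ∀ b ∈ (e :: f :: fs).dropLast, 0 ≤ b ∧ b < 256 := by
          intro b hb
          exact hrange _ (List.dropLast_subset _ hb)
        have hdl : (e :: f :: fs).dropLast.length = (e :: f :: fs).length - 1 := by
          simp [List.length_dropLast]
        rw [← hdl, bulk_eq_flatMap _ hdrange hdne]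
        apply List.flatMap_congr
        intro b hb
        have hbr := hdrange b hb
        rw [pyBinTail, if_neg (by omega), zfill]
    rw [hhead, pyZfill_fmtBin _ _ hlast.1]
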